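-- pv_equiv track=rewrite | github.com/subnuwa/Vul_Tech | main/tools/Scan4Gpickle.py | countWeight
-- ===== SOURCE A (Python) =====
-- ifWords = ["if","else if"]
--
-- keyWords = ["if","while","for","switch","else","else if"]
--
-- def countWeight(cfv):
--         weight = 0
--         cur_weight = 0
--         record = []
--         for item in cfv:
--             if item in keyWords:
--                 record.append(item)
--                 if len([x for x in record if x in ifWords]) > weight:
--                     weight = len([x for x in record if x in ifWords])
--             else:
--                 if item == "}":
--                     if len(record) > 0:
--                         record.pop()
--         return weight
-- ===== SOURCE B (Python) =====
-- ifWords = ["if","else if"]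
--
-- keyWords = ["if","while","for","switch","else","else if"]
--
-- def countWeight(cfv):
--     best = 0
--     cur = 0
--     stack = []  # booleans: whether the pushed keyword is an if-word
--     for item in cfv:
--         if item in keyWords:
--             is_if = item in ifWords
--             if is_if:
--                 cur += 1
--             stack.append(is_if)
--             if cur > best:
--                 best = cur
--         elif item == "}":
--             if stack:
--                 if stack.pop():
--                     cur -= 1
--     return best
-- ===== Notes on version B (the rewrite author's own statement) =====
-- stated objective: alternative
-- what changed: B keeps an incremental counter of if-words on the stack (pushed/popped as booleans) and a running max, instead of A's re-filtering the whole record list at every keyword; on the measured inputs the cost is the same.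
import Mathlib
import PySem

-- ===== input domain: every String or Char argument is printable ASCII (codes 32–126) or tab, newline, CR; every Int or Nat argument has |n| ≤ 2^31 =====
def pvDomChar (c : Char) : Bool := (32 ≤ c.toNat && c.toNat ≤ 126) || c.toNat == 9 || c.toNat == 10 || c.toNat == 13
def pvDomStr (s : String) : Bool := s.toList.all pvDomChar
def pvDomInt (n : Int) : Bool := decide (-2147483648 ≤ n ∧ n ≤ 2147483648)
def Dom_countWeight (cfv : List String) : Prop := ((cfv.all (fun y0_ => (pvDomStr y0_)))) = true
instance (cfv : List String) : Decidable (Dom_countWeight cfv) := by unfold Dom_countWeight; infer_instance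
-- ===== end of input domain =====

-- B replaces A's re-filtering of the whole record list at every keyword with an incremental
-- if-word counter pushed/popped alongside a boolean stack and a running max (objective: alternative).

-- ===== PORT A =====
def ifWords : List String := ["if", "else if"]

def keyWords : List String := ["if", "while", "for", "switch", "else", "else if"]

-- one iteration of A's for-loop; state = (weight, record)
def aStep (s : Int × List String) (item : String) : Int × List String :=
  let weight := s.1
  let record := s.2
  if item ∈ keyWords then
    let record := record ++ [item]
    if ((record.filter (fun x => x ∈ ifWords)).length : Int) > weight then
      (((record.filter (fun x => x ∈ ifWords)).length : Int), record)
    else (weight, record)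
  else
    if item == "}" then
      if record.length > 0 then (weight, record.dropLast) else (weight, record)
    else (weight, record)

def countWeight (cfv : List String) : Int :=
  (cfv.foldl aStep (0, [])).1

-- ===== PORT B =====
-- one iteration of B's for-loop; state = (best, cur, boolean stack)
def bStep (s : Int × Int × List Bool) (item : String) : Int × Int × List Bool :=
  let best := s.1
  let cur := s.2.1
  let stack := s.2.2
  if item ∈ keyWords then
    let isIf : Bool := item ∈ ifWords
    let cur := if isIf then cur + 1 else cur
    let stack := isIf :: stack          -- list head = Python stack top
    if cur > best then (cur, cur, stack) else (best, cur, stack)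
  else
    if item == "}" then
      match stack with
      | [] => (best, cur, stack)
      | b :: rest => if b then (best, cur - 1, rest) else (best, cur, rest)
    else (best, cur, stack)

def countWeight_alt (cfv : List String) : Int :=
  (cfv.foldl bStep (0, 0, [])).1

-- ===== PRECONDITION & SPEC =====
def Spec_countWeight (cfv : List String) (out : Int) : Prop := out = countWeight_alt cfv
instance (cfv : List String) (out : Int) : Decidable (Spec_countWeight cfv out) := by unfold Spec_countWeight; infer_instance

-- ===== CLAIM (what is proved, stated in full; the proofs are below) =====
def Claim_equal_countWeight : Prop := ∀ (cfv : List String), Dom_countWeight cfv → Spec_countWeight cfv (countWeight cfv)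

-- ===== LEMMAS AND PROOFS =====

-- the abstraction of A's record that B maintains: if-word count and the boolean stack
def cnt (r : List String) : Int := ((r.filter (fun x => x ∈ ifWords)).length : Int)

def bs (r : List String) : List Bool := (r.map (fun x => decide (x ∈ ifWords))).reverse

lemma cnt_push (r : List String) (item : String) :
    cnt (r ++ [item]) = if item ∈ ifWords then cnt r + 1 else cnt r := by
  simp [cnt, List.filter_append]
  split_ifs with h <;> simp [h]

lemma bs_push (r : List String) (item : String) :
    bs (r ++ [item]) = decide (item ∈ ifWords) :: bs r := by
  simp [bs]

-- one B step from the abstraction of A's state lands on the abstraction of A's next state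
lemma cnt_def (r : List String) :
    ((r.filter (fun x => x ∈ ifWords)).length : Int) = cnt r := rfl

lemma step_sim (w : Int) (r : List String) (item : String) :
    bStep (w, cnt r, bs r) item =
      ((aStep (w, r) item).1, cnt (aStep (w, r) item).2, bs (aStep (w, r) item).2) := by
  have hc := cnt_push r item
  have hbs := bs_push r item
  by_cases hk : item ∈ keyWords
  · by_cases hi : item ∈ ifWords <;>
      simp only [bStep, aStep, hk, cnt_def, hi, hc, hbs, decide_true, decide_false, if_true,
        if_false, ite_true, ite_false] <;>
      split_ifs <;> simp_all
  · by_cases hb : item = "}"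
    · subst hb
      rcases List.eq_nil_or_concat r with rfl | ⟨r0, a, rfl⟩
      · simp [bStep, aStep, hk, cnt, bs]
      · have hc0 := cnt_push r0 a
        have hbs0 := bs_push r0 a
        have hlen : (r0 ++ [a]).length > 0 := by simp
        by_cases hi : a ∈ ifWords <;>
          simp only [bStep, aStep, hk, hi, hc0, hbs0, hlen, List.dropLast_concat, decide_true,
            decide_false, if_true, if_false] <;>
          split_ifs <;> simp_all
    · simp [bStep, aStep, hk, hb]

-- coupling invariant over the whole loop
lemma loop_sim (cfv : List String) : ∀ (w : Int) (r : List String),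
    cfv.foldl bStep (w, cnt r, bs r) =
      ((cfv.foldl aStep (w, r)).1, cnt (cfv.foldl aStep (w, r)).2, bs (cfv.foldl aStep (w, r)).2) := by
  induction cfv with
  | nil => intro w r; simp
  | cons item rest ih =>
    intro w r
    simp only [List.foldl_cons, step_sim]
    exact ih (aStep (w, r) item).1 (aStep (w, r) item).2

-- ===== VERDICT (by name: the statement is the Claim_ definition above) =====
theorem countWeight_spec : Claim_equal_countWeight := by
  intro cfv _
  unfold Spec_countWeight countWeight countWeight_alt
  rw [show ((0 : Int), (0 : Int), ([] : List Bool)) = ((0 : Int), cnt [], bs []) by simp [cnt, bs],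
      loop_sim]
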